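-- pv_equiv track=rewrite | github.com/open-ce/open-ce-builder | open_ce/get_licenses.py | _clean_license_type
-- ===== SOURCE A (Python) =====
-- def _clean_license_type(license_str):
--     license_types =[("Apache-2.0", ["Apache 2.0", "Apache License 2.0", "Apache-2", "apache-2", "Apache-2.0"]),
--                     ("Boost", ["BSL", "Boost", "BSL (Boost)"]),
--                     ("BSD", ["BSD", "BSD Like"]),
--                     ("BSD-2-Clause", ["2-clause BSD", "BSD 2-Clause", "BSD-2-Clause", "BSD-2-clause",
--                                       "BSD 2-clause", "BSD 2 Clause", "BSD2", "New BSD License"]),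
--                     ("BSD-3-Clause", ["3-clause BSD", "BSD 3-Clause", "BSD-3-Clause", "BSD-3-clause",
--                                       "BSD 3-clause", "BSD 3 Clause", "BSD3", "modified 3-clause BSD",
--                                       "Google"]),
--                     ("Curl", ["curl", "Curl", "MIT/X derivate (http://curl.haxx.se/docs/copyright.html)"]),
--                     ("Eclipse", ["EPL", "Eclipse", "EPL (eclipse)"]),
--                     ("FreeType", ["LicenseRef-FreeType", "FreeType"]),
--                     ("GPL-2.0", ["GPL-2.0", "GPL-2.0-only", "GPL-2.0-or-later", "GPLv2", "GPL 2"]),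
--                     ("GPL-3.0", ["GPL-3.0", "GPL-3.0-only", "GPL-3.0-or-later", "GPLv3", "GPL 3"]),
--                     ("LGPL-2.1", ["LGPL-2.1", "LGPL 2.1", "LGPL2", "LGPLv2", "LGPLv2.1", "LGPL-2.1-or-later"]),
--                     ("LGPL-3.0", ["LGPL-3.0", "LGPL 3.0", "LGPL3", "LGPLv3", "LGPLv3.0", "LGPL-3.0-or-later"]),
--                     ("MIT", ["MIT", "MIT License", "Free software (MIT-like)"]),
--                     ("MPL-1.1", ["MPL-1.1", "MPL 1.1", "MPLv1.1", "Mozilla 1.1"]),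
--                     ("MPL-2.0", ["MPL", "MPL-2.0", "MPL 2.0", "MPLv2.0", "Mozilla", "Mozilla 2.0"]),
--                     ("OpenLDAP", ["OpenLDAP", "OpenLDAP Public License"]),
--                     ("PIL", ["PIL", "LicenseRef-PIL"]),
--                     ("PSF-2.0", ["PSF", "PSF-2.0", "Python-2.0", "LicenseRef-PSF-based"]),
--                     ("ZLIB", ["ZLIB", "zlib", "zlib/libpng"])]
--     separators = [",", " AND ", " and ", " OR ", " or "]
--
--     # Split up license types within a string if there are multiple license types provided.
--     for separator in separators:
--         licenses = license_str.split(separator)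
--         if len(licenses) > 1:
--             result = []
--             for lic_type in licenses:
--                 result += _clean_license_type(lic_type)
--             return result
--
--     # Convert variant names of different license types to a single value,
--     # based on the table within license_types.
--     license_str = license_str.strip()
--     for license_type, potentials in license_types:
--         if license_str in potentials:
--             return [license_type]
--
--     return [license_str]
-- ===== SOURCE B (Python) =====
-- """Iterative re-implementation of _clean_license_type: sequential split passes
-- over a token list instead of recursion, and a flat first-match variant table."""
--
-- _SEPARATORS = [",", " AND ", " and ", " OR ", " or "]
--
-- # (variant, canonical) pairs, flattened from the grouped table in group order.
-- _PAIRS = [('Apache 2.0', 'Apache-2.0'),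
--           ('Apache License 2.0', 'Apache-2.0'),
--           ('Apache-2', 'Apache-2.0'),
--           ('apache-2', 'Apache-2.0'),
--           ('Apache-2.0', 'Apache-2.0'),
--           ('BSL', 'Boost'),
--           ('Boost', 'Boost'),
--           ('BSL (Boost)', 'Boost'),
--           ('BSD', 'BSD'),
--           ('BSD Like', 'BSD'),
--           ('2-clause BSD', 'BSD-2-Clause'),
--           ('BSD 2-Clause', 'BSD-2-Clause'),
--           ('BSD-2-Clause', 'BSD-2-Clause'),
--           ('BSD-2-clause', 'BSD-2-Clause'),
--           ('BSD 2-clause', 'BSD-2-Clause'),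
--           ('BSD 2 Clause', 'BSD-2-Clause'),
--           ('BSD2', 'BSD-2-Clause'),
--           ('New BSD License', 'BSD-2-Clause'),
--           ('3-clause BSD', 'BSD-3-Clause'),
--           ('BSD 3-Clause', 'BSD-3-Clause'),
--           ('BSD-3-Clause', 'BSD-3-Clause'),
--           ('BSD-3-clause', 'BSD-3-Clause'),
--           ('BSD 3-clause', 'BSD-3-Clause'),
--           ('BSD 3 Clause', 'BSD-3-Clause'),
--           ('BSD3', 'BSD-3-Clause'),
--           ('modified 3-clause BSD', 'BSD-3-Clause'),
--           ('Google', 'BSD-3-Clause'),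
--           ('curl', 'Curl'),
--           ('Curl', 'Curl'),
--           ('MIT/X derivate (http://curl.haxx.se/docs/copyright.html)', 'Curl'),
--           ('EPL', 'Eclipse'),
--           ('Eclipse', 'Eclipse'),
--           ('EPL (eclipse)', 'Eclipse'),
--           ('LicenseRef-FreeType', 'FreeType'),
--           ('FreeType', 'FreeType'),
--           ('GPL-2.0', 'GPL-2.0'),
--           ('GPL-2.0-only', 'GPL-2.0'),
--           ('GPL-2.0-or-later', 'GPL-2.0'),
--           ('GPLv2', 'GPL-2.0'),
--           ('GPL 2', 'GPL-2.0'),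
--           ('GPL-3.0', 'GPL-3.0'),
--           ('GPL-3.0-only', 'GPL-3.0'),
--           ('GPL-3.0-or-later', 'GPL-3.0'),
--           ('GPLv3', 'GPL-3.0'),
--           ('GPL 3', 'GPL-3.0'),
--           ('LGPL-2.1', 'LGPL-2.1'),
--           ('LGPL 2.1', 'LGPL-2.1'),
--           ('LGPL2', 'LGPL-2.1'),
--           ('LGPLv2', 'LGPL-2.1'),
--           ('LGPLv2.1', 'LGPL-2.1'),
--           ('LGPL-2.1-or-later', 'LGPL-2.1'),
--           ('LGPL-3.0', 'LGPL-3.0'),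
--           ('LGPL 3.0', 'LGPL-3.0'),
--           ('LGPL3', 'LGPL-3.0'),
--           ('LGPLv3', 'LGPL-3.0'),
--           ('LGPLv3.0', 'LGPL-3.0'),
--           ('LGPL-3.0-or-later', 'LGPL-3.0'),
--           ('MIT', 'MIT'),
--           ('MIT License', 'MIT'),
--           ('Free software (MIT-like)', 'MIT'),
--           ('MPL-1.1', 'MPL-1.1'),
--           ('MPL 1.1', 'MPL-1.1'),
--           ('MPLv1.1', 'MPL-1.1'),
--           ('Mozilla 1.1', 'MPL-1.1'),
--           ('MPL', 'MPL-2.0'),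
--           ('MPL-2.0', 'MPL-2.0'),
--           ('MPL 2.0', 'MPL-2.0'),
--           ('MPLv2.0', 'MPL-2.0'),
--           ('Mozilla', 'MPL-2.0'),
--           ('Mozilla 2.0', 'MPL-2.0'),
--           ('OpenLDAP', 'OpenLDAP'),
--           ('OpenLDAP Public License', 'OpenLDAP'),
--           ('PIL', 'PIL'),
--           ('LicenseRef-PIL', 'PIL'),
--           ('PSF', 'PSF-2.0'),
--           ('PSF-2.0', 'PSF-2.0'),
--           ('Python-2.0', 'PSF-2.0'),
--           ('LicenseRef-PSF-based', 'PSF-2.0'),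
--           ('ZLIB', 'ZLIB'),
--           ('zlib', 'ZLIB'),
--           ('zlib/libpng', 'ZLIB')]
--
--
-- def _canonical(token):
--     for variant, canonical in _PAIRS:
--         if token == variant:
--             return canonical
--     return token
--
--
-- def _clean_license_type(license_str):
--     tokens = [license_str]
--     for sep in _SEPARATORS:
--         tokens = [piece for tok in tokens for piece in tok.split(sep)]
--     return [_canonical(tok.strip()) for tok in tokens]
-- ===== Notes on version B (the rewrite author's own statement) =====
-- stated objective: simpler
-- what changed: Replaces A's restart-from-the-top recursion over separators with iterative sequential split passes over a flat token list, and replaces the grouped variant table scanned by membership with a flat (variant, canonical) first-match pair list.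
import Mathlib
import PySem

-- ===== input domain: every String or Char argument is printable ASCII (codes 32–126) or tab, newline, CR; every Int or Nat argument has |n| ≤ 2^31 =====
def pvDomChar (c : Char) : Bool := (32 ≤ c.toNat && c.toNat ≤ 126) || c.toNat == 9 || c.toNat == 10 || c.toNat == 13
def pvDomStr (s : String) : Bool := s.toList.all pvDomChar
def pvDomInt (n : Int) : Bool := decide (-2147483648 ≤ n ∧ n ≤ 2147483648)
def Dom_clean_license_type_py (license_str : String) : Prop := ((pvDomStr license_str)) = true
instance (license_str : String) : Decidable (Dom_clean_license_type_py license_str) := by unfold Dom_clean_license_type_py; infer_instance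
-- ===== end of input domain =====

-- B replaces A's restart-from-the-top recursion over separators with iterative sequential
-- split passes over a flat token list, and replaces the grouped variant table (scanned by
-- list membership) with a flat (variant, canonical) first-match pair list; same results.

-- ===== PORT A =====
-- The termination of A's recursion (each piece of a successful split is strictly shorter)
-- rests on a characterisation of PySem.Chars.splitOn proved here, above the port, because
-- the port cites it by name in its decreasing_by.

-- `PySem.Chars.splitOn s sep` (Python's s.split(sep), sep ≠ "") intercalates back to s,
-- is nonempty, and no piece contains an occurrence of sep; hence every piece of a proper
-- split is strictly shorter — the termination measure of A's recursion.
theorem infix_iff_drop (sep s : List Char) : sep <:+: s ↔ ∃ j, sep <+: s.drop j := by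
  rw [← PySem.Chars.isIn_iff_infix, ← PySem.Chars.exists_prefix_drop_iff_isIn]

theorem ic_cons2 (sep a b : List Char) (t : List (List Char)) :
    List.intercalate sep (a :: b :: t) = a ++ sep ++ List.intercalate sep (b :: t) := by
  simp [List.intercalate, List.intersperse]

theorem go_nil (sep : List Char) (f : Nat) (cur : List Char) (acc : List (List Char)) :
    PySem.Chars.splitOn.go sep (f+1) [] cur acc = (cur.reverse :: acc).reverse := by
  rw [PySem.Chars.splitOn.go]
  omega

theorem go_cons (sep : List Char) (f : Nat) (c : Char) (rest cur : List Char) (acc : List (List Char)) :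
    PySem.Chars.splitOn.go sep (f+1) (c :: rest) cur acc =
      (if sep.isPrefixOf (c :: rest) then PySem.Chars.splitOn.go sep f (List.drop sep.length (c :: rest)) [] (cur.reverse :: acc)
       else PySem.Chars.splitOn.go sep f rest (c :: cur) acc) := by
  rw [PySem.Chars.splitOn.go]

def pvSplitSpec (sep s : List Char) (ps : List (List Char)) : Prop :=
  List.intercalate sep ps = s ∧ ps ≠ [] ∧ ∀ p ∈ ps, ¬ sep <:+: p

theorem pv_go_spec (sep : List Char) (hsep : sep ≠ []) :
    ∀ (fuel : Nat) (l cur : List Char) (acc : List (List Char)), l.length < fuel →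
    (∀ i, i < cur.length → ¬ sep <+: (cur.reverse ++ l).drop i) →
    ∃ ps, PySem.Chars.splitOn.go sep fuel l cur acc = acc.reverse ++ ps ∧
      pvSplitSpec sep (cur.reverse ++ l) ps := by
  intro fuel
  induction fuel with
  | zero => intro l cur acc h; omega
  | succ f ih =>
    intro l cur acc hf hinv
    match l with
    | [] =>
        refine ⟨[cur.reverse], by rw [go_nil]; simp, ?_, by simp, ?_⟩
        · simp [List.intercalate]
        · intro p hp
          simp at hp; subst hp
          rw [infix_iff_drop]
          rintro ⟨j, hj⟩
          by_cases hjl : j < cur.reverse.length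
          · exact hinv j (by simpa using hjl) (by simpa using hj)
          · have : (cur.reverse).drop j = [] := List.drop_eq_nil_of_le (by omega)
            rw [this] at hj
            exact hsep (List.prefix_nil.mp hj)
    | c :: rest =>
        rw [go_cons]
        by_cases hpre : sep.isPrefixOf (c :: rest)
        · rw [if_pos hpre]
          have hpre' : sep <+: (c :: rest) := List.isPrefixOf_iff_prefix.mp hpre
          have h1 : 0 < sep.length := List.length_pos_of_ne_nil hsep
          have hdl : (List.drop sep.length (c :: rest)).length < f := by
            simp at hf ⊢; omega
          obtain ⟨ps, hgo, hic, hne, hocc⟩ := ih (List.drop sep.length (c :: rest)) [] (cur.reverse :: acc) hdl (by simp)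
          refine ⟨cur.reverse :: ps, by rw [hgo]; simp, ?_, by simp, ?_⟩
          · match ps, hne with
            | q :: qs, _ =>
              rw [ic_cons2]
              simp only [List.reverse_nil, List.nil_append] at hic
              rw [hic]
              have hsl : sep ++ List.drop sep.length (c :: rest) = c :: rest := by
                obtain ⟨t, ht⟩ := hpre'
                conv_rhs => rw [← ht]
                rw [← ht, List.drop_left]
              simp [List.append_assoc, hsl]
          · intro p hp
            rcases List.mem_cons.1 hp with rfl | hp
            · rw [infix_iff_drop]
              rintro ⟨j, hj⟩
              by_cases hjl : j < cur.reverse.length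
              · have hext : (cur.reverse).drop j <+: ((cur.reverse ++ c :: rest).drop j) := by
                  rw [List.drop_append_of_le_length (by omega)]
                  exact List.prefix_append _ _
                exact hinv j (by simpa using hjl) (hj.trans hext)
              · have : (cur.reverse).drop j = [] := List.drop_eq_nil_of_le (by omega)
                rw [this] at hj
                exact hsep (List.prefix_nil.mp hj)
            · exact hocc p hp
        · rw [if_neg hpre]
          have hinv' : ∀ i, i < (c :: cur).length → ¬ sep <+: ((c :: cur).reverse ++ rest).drop i := by
            have hsame : (c :: cur).reverse ++ rest = cur.reverse ++ c :: rest := by simp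
            rw [hsame]
            intro i hi
            rcases Nat.lt_or_ge i cur.length with h | h
            · exact hinv i (by simpa using h)
            · have hieq : i = cur.length := by simp at hi; omega
              subst hieq
              rw [List.drop_append_of_le_length (by simp)]
              have hnil : List.drop cur.length cur.reverse = [] := List.drop_eq_nil_of_le (by simp)
              rw [hnil, List.nil_append]
              intro hc
              exact hpre (List.isPrefixOf_iff_prefix.mpr hc)
          obtain ⟨ps, hgo, hic, hne, hocc⟩ := ih rest (c :: cur) acc (by simp at hf ⊢; omega) hinv'
          exact ⟨ps, hgo, by simpa using hic, hne, hocc⟩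

theorem pv_splitOn_spec (sep s : List Char) (hsep : sep ≠ []) :
    pvSplitSpec sep s (PySem.Chars.splitOn s sep) := by
  obtain ⟨ps, hgo, hspec⟩ := pv_go_spec sep hsep (s.length + 1) s [] [] (by omega) (by simp)
  unfold PySem.Chars.splitOn
  rw [hgo]
  simpa using hspec

theorem mem_ic_infix (sep : List Char) :
    ∀ (ps : List (List Char)) (p : List Char), p ∈ ps → p <:+: List.intercalate sep ps := by
  intro ps
  induction ps with
  | nil => simp
  | cons a t ih =>
    intro p hp
    rcases List.mem_cons.1 hp with rfl | hp
    · match t with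
      | [] => simp [List.intercalate]
      | b :: t' => rw [ic_cons2]; exact ((List.prefix_append p sep).trans (List.prefix_append _ _)).isInfix
    · match t with
      | [] => simp at hp
      | b :: t' =>
        rw [ic_cons2]
        exact (ih p hp).trans (List.suffix_append _ _).isInfix

theorem mem_ic_lt {sep : List Char} (hsep : sep ≠ []) :
    ∀ (ps : List (List Char)) (p : List Char), p ∈ ps → 1 < ps.length → p.length < (List.intercalate sep ps).length := by
  intro ps p hp hlen
  match ps, hp, hlen with
  | a :: b :: t, hp, _ =>
    have h1 : 0 < sep.length := List.length_pos_of_ne_nil hsep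
    rw [ic_cons2]
    rcases List.mem_cons.1 hp with rfl | hp
    · simp; omega
    · have := List.IsInfix.length_le (mem_ic_infix sep (b :: t) p hp)
      simp; omega

theorem pv_piece_lt {sep s : List Char} (hsep : sep ≠ [])
    {p : List Char} (hp : p ∈ PySem.Chars.splitOn s sep)
    (hlen : 1 < (PySem.Chars.splitOn s sep).length) : p.length < s.length := by
  obtain ⟨hic, hne, hocc⟩ := pv_splitOn_spec sep s hsep
  have := mem_ic_lt hsep _ p hp hlen
  rwa [hic] at this

-- A's separator list and variant table (module/function constants of Source A).
def separatorsA : List (List Char) :=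
  [",".toList, " AND ".toList, " and ".toList, " OR ".toList, " or ".toList]

def license_types_A : List (String × List String) :=
  [("Apache-2.0", ["Apache 2.0", "Apache License 2.0", "Apache-2", "apache-2", "Apache-2.0"]),
   ("Boost", ["BSL", "Boost", "BSL (Boost)"]),
   ("BSD", ["BSD", "BSD Like"]),
   ("BSD-2-Clause", ["2-clause BSD", "BSD 2-Clause", "BSD-2-Clause", "BSD-2-clause", "BSD 2-clause", "BSD 2 Clause", "BSD2", "New BSD License"]),
   ("BSD-3-Clause", ["3-clause BSD", "BSD 3-Clause", "BSD-3-Clause", "BSD-3-clause", "BSD 3-clause", "BSD 3 Clause", "BSD3", "modified 3-clause BSD", "Google"]),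
   ("Curl", ["curl", "Curl", "MIT/X derivate (http://curl.haxx.se/docs/copyright.html)"]),
   ("Eclipse", ["EPL", "Eclipse", "EPL (eclipse)"]),
   ("FreeType", ["LicenseRef-FreeType", "FreeType"]),
   ("GPL-2.0", ["GPL-2.0", "GPL-2.0-only", "GPL-2.0-or-later", "GPLv2", "GPL 2"]),
   ("GPL-3.0", ["GPL-3.0", "GPL-3.0-only", "GPL-3.0-or-later", "GPLv3", "GPL 3"]),
   ("LGPL-2.1", ["LGPL-2.1", "LGPL 2.1", "LGPL2", "LGPLv2", "LGPLv2.1", "LGPL-2.1-or-later"]),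
   ("LGPL-3.0", ["LGPL-3.0", "LGPL 3.0", "LGPL3", "LGPLv3", "LGPLv3.0", "LGPL-3.0-or-later"]),
   ("MIT", ["MIT", "MIT License", "Free software (MIT-like)"]),
   ("MPL-1.1", ["MPL-1.1", "MPL 1.1", "MPLv1.1", "Mozilla 1.1"]),
   ("MPL-2.0", ["MPL", "MPL-2.0", "MPL 2.0", "MPLv2.0", "Mozilla", "Mozilla 2.0"]),
   ("OpenLDAP", ["OpenLDAP", "OpenLDAP Public License"]),
   ("PIL", ["PIL", "LicenseRef-PIL"]),
   ("PSF-2.0", ["PSF", "PSF-2.0", "Python-2.0", "LicenseRef-PSF-based"]),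
   ("ZLIB", ["ZLIB", "zlib", "zlib/libpng"])]

-- the inner `for license_type, potentials in license_types: if license_str in potentials: return [license_type]`
def lookupA : List (String × List String) → String → List String
  | [], t => [t]
  | (k, vs) :: rest, t => if t ∈ vs then [k] else lookupA rest t

-- the `for separator in separators: licenses = license_str.split(separator); if len(licenses) > 1: …` scan
def firstSplitA : List (List Char) → List Char → Option (List (List Char))
  | [], _ => none
  | sep :: rest, s =>
      let licenses := PySem.Chars.splitOn s sep
      if 1 < licenses.length then some licenses else firstSplitA rest s

theorem firstSplitA_piece_lt {seps : List (List Char)} {s : List Char} {ps : List (List Char)}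
    (hne : ∀ x ∈ seps, x ≠ ([] : List Char))
    (h : firstSplitA seps s = some ps) {p : List Char} (hp : p ∈ ps) : p.length < s.length := by
  induction seps with
  | nil => simp [firstSplitA] at h
  | cons sep rest ih =>
      simp only [firstSplitA] at h
      split at h
      · cases h
        exact pv_piece_lt (hne sep (by simp)) hp (by assumption)
      · exact ih (fun x hx => hne x (by simp [hx])) h

theorem separatorsA_ne : ∀ x ∈ separatorsA, x ≠ ([] : List Char) := by decide

def cltA (s : List Char) : List String :=
  match h : firstSplitA separatorsA s with
  | some licenses =>
      -- result = []; for lic_type in licenses: result += _clean_license_type(lic_type)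
      licenses.attach.flatMap (fun p => cltA p.1)
  | none =>
      -- license_str = license_str.strip(); table scan; return [license_str]
      lookupA license_types_A (String.ofList (PySem.Chars.strip s))
termination_by s.length
decreasing_by exact firstSplitA_piece_lt separatorsA_ne h p.2

def clean_license_type_py (license_str : String) : List String :=
  cltA license_str.toList

-- ===== PORT B =====
def sepsB : List (List Char) :=
  [",".toList, " AND ".toList, " and ".toList, " OR ".toList, " or ".toList]

def pairsB : List (String × String) :=
  [("Apache 2.0", "Apache-2.0"),
   ("Apache License 2.0", "Apache-2.0"),
   ("Apache-2", "Apache-2.0"),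
   ("apache-2", "Apache-2.0"),
   ("Apache-2.0", "Apache-2.0"),
   ("BSL", "Boost"),
   ("Boost", "Boost"),
   ("BSL (Boost)", "Boost"),
   ("BSD", "BSD"),
   ("BSD Like", "BSD"),
   ("2-clause BSD", "BSD-2-Clause"),
   ("BSD 2-Clause", "BSD-2-Clause"),
   ("BSD-2-Clause", "BSD-2-Clause"),
   ("BSD-2-clause", "BSD-2-Clause"),
   ("BSD 2-clause", "BSD-2-Clause"),
   ("BSD 2 Clause", "BSD-2-Clause"),
   ("BSD2", "BSD-2-Clause"),
   ("New BSD License", "BSD-2-Clause"),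
   ("3-clause BSD", "BSD-3-Clause"),
   ("BSD 3-Clause", "BSD-3-Clause"),
   ("BSD-3-Clause", "BSD-3-Clause"),
   ("BSD-3-clause", "BSD-3-Clause"),
   ("BSD 3-clause", "BSD-3-Clause"),
   ("BSD 3 Clause", "BSD-3-Clause"),
   ("BSD3", "BSD-3-Clause"),
   ("modified 3-clause BSD", "BSD-3-Clause"),
   ("Google", "BSD-3-Clause"),
   ("curl", "Curl"),
   ("Curl", "Curl"),
   ("MIT/X derivate (http://curl.haxx.se/docs/copyright.html)", "Curl"),
   ("EPL", "Eclipse"),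
   ("Eclipse", "Eclipse"),
   ("EPL (eclipse)", "Eclipse"),
   ("LicenseRef-FreeType", "FreeType"),
   ("FreeType", "FreeType"),
   ("GPL-2.0", "GPL-2.0"),
   ("GPL-2.0-only", "GPL-2.0"),
   ("GPL-2.0-or-later", "GPL-2.0"),
   ("GPLv2", "GPL-2.0"),
   ("GPL 2", "GPL-2.0"),
   ("GPL-3.0", "GPL-3.0"),
   ("GPL-3.0-only", "GPL-3.0"),
   ("GPL-3.0-or-later", "GPL-3.0"),
   ("GPLv3", "GPL-3.0"),
   ("GPL 3", "GPL-3.0"),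
   ("LGPL-2.1", "LGPL-2.1"),
   ("LGPL 2.1", "LGPL-2.1"),
   ("LGPL2", "LGPL-2.1"),
   ("LGPLv2", "LGPL-2.1"),
   ("LGPLv2.1", "LGPL-2.1"),
   ("LGPL-2.1-or-later", "LGPL-2.1"),
   ("LGPL-3.0", "LGPL-3.0"),
   ("LGPL 3.0", "LGPL-3.0"),
   ("LGPL3", "LGPL-3.0"),
   ("LGPLv3", "LGPL-3.0"),
   ("LGPLv3.0", "LGPL-3.0"),
   ("LGPL-3.0-or-later", "LGPL-3.0"),
   ("MIT", "MIT"),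
   ("MIT License", "MIT"),
   ("Free software (MIT-like)", "MIT"),
   ("MPL-1.1", "MPL-1.1"),
   ("MPL 1.1", "MPL-1.1"),
   ("MPLv1.1", "MPL-1.1"),
   ("Mozilla 1.1", "MPL-1.1"),
   ("MPL", "MPL-2.0"),
   ("MPL-2.0", "MPL-2.0"),
   ("MPL 2.0", "MPL-2.0"),
   ("MPLv2.0", "MPL-2.0"),
   ("Mozilla", "MPL-2.0"),
   ("Mozilla 2.0", "MPL-2.0"),
   ("OpenLDAP", "OpenLDAP"),
   ("OpenLDAP Public License", "OpenLDAP"),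
   ("PIL", "PIL"),
   ("LicenseRef-PIL", "PIL"),
   ("PSF", "PSF-2.0"),
   ("PSF-2.0", "PSF-2.0"),
   ("Python-2.0", "PSF-2.0"),
   ("LicenseRef-PSF-based", "PSF-2.0"),
   ("ZLIB", "ZLIB"),
   ("zlib", "ZLIB"),
   ("zlib/libpng", "ZLIB")]

-- def _canonical(token): first pair whose variant equals the token, else the token itself
def canonB : List (String × String) → String → String
  | [], t => t
  | (v, c) :: rest, t => if t = v then c else canonB rest t

def clean_license_type_py_alt (license_str : String) : List String :=
  -- tokens = [license_str]; for sep in _SEPARATORS: tokens = [piece for tok in tokens for piece in tok.split(sep)]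
  let tokens := sepsB.foldl (fun ts sep => ts.flatMap (fun t => PySem.Chars.splitOn t sep)) [license_str.toList]
  -- return [_canonical(tok.strip()) for tok in tokens]
  tokens.map (fun t => canonB pairsB (PySem.Str.strip (String.ofList t)))

-- ===== PRECONDITION & SPEC =====
def Spec_clean_license_type_py (license_str : String) (out : List String) : Prop := out = clean_license_type_py_alt license_str
instance (license_str : String) (out : List String) : Decidable (Spec_clean_license_type_py license_str out) := by unfold Spec_clean_license_type_py; infer_instance

-- ===== CLAIM (what is proved, stated in full; the proofs are below) =====
def Claim_equal_clean_license_type_py : Prop := ∀ (license_str : String), Dom_clean_license_type_py license_str → Spec_clean_license_type_py license_str (clean_license_type_py license_str)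

-- ===== LEMMAS AND PROOFS =====

-- B's sequential passes, written as a recursion over the separator list (proof-only helper).
def splitAllL : List (List Char) → List Char → List (List Char)
  | [], s => [s]
  | sep :: rest, s => (PySem.Chars.splitOn s sep).flatMap (splitAllL rest)

theorem foldB_eq (seps : List (List Char)) :
    ∀ ts : List (List Char), seps.foldl (fun ts sep => ts.flatMap (fun t => PySem.Chars.splitOn t sep)) ts
      = ts.flatMap (splitAllL seps) := by
  induction seps with
  | nil => intro ts; simp [splitAllL]
  | cons sep rest ih =>
      intro ts
      simp only [List.foldl_cons, ih, List.flatMap_assoc, splitAllL]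

theorem splitOn_single_of_not_infix {sep s : List Char} (hsep : sep ≠ []) (h : ¬ sep <:+: s) :
    PySem.Chars.splitOn s sep = [s] := by
  obtain ⟨hic, hne, hocc⟩ := pv_splitOn_spec sep s hsep
  match hps : PySem.Chars.splitOn s sep, hne with
  | [a], _ =>
    rw [hps] at hic
    simp [List.intercalate] at hic
    rw [hic]
  | a :: b :: t, _ =>
    exfalso
    rw [hps, ic_cons2] at hic
    exact h (hic ▸ ⟨a, List.intercalate sep (b :: t), by simp [List.append_assoc]⟩)

theorem one_lt_splitOn_of_infix {sep s : List Char} (hsep : sep ≠ []) (h : sep <:+: s) :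
    1 < (PySem.Chars.splitOn s sep).length := by
  obtain ⟨hic, hne, hocc⟩ := pv_splitOn_spec sep s hsep
  match hps : PySem.Chars.splitOn s sep, hne with
  | [a], _ =>
    exfalso
    rw [hps] at hic hocc
    simp [List.intercalate] at hic
    exact hocc a (by simp) (hic ▸ h)
  | a :: b :: t, _ => simp

theorem splitAll_skip {sep s : List Char} (h : ¬ sep <:+: s) (hsep : sep ≠ []) (rest : List (List Char)) :
    splitAllL (sep :: rest) s = splitAllL rest s := by
  show (PySem.Chars.splitOn s sep).flatMap (splitAllL rest) = _
  rw [splitOn_single_of_not_infix hsep h]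
  simp

theorem splitAll_skip_all {pre : List (List Char)} {s : List Char}
    (hne : ∀ x ∈ pre, x ≠ ([] : List Char)) (h : ∀ x ∈ pre, ¬ x <:+: s) (rest : List (List Char)) :
    splitAllL (pre ++ rest) s = splitAllL rest s := by
  induction pre with
  | nil => simp
  | cons x xs ih =>
      rw [List.cons_append, splitAll_skip (h x (by simp)) (hne x (by simp)),
          ih (fun y hy => hne y (by simp [hy])) (fun y hy => h y (by simp [hy]))]

theorem not_infix_of_not_one_lt {sep s : List Char} (hsep : sep ≠ [])
    (h : ¬ 1 < (PySem.Chars.splitOn s sep).length) : ¬ sep <:+: s :=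
  fun hi => h (one_lt_splitOn_of_infix hsep hi)

theorem piece_infix {sep s : List Char} (hsep : sep ≠ [])
    {p : List Char} (hp : p ∈ PySem.Chars.splitOn s sep) : p <:+: s := by
  obtain ⟨hic, hne, hocc⟩ := pv_splitOn_spec sep s hsep
  exact hic ▸ mem_ic_infix sep _ p hp

theorem piece_not_infix {sep s : List Char} (hsep : sep ≠ [])
    {p : List Char} (hp : p ∈ PySem.Chars.splitOn s sep) : ¬ sep <:+: p :=
  (pv_splitOn_spec sep s hsep).2.2 p hp

theorem firstSplitA_none {seps : List (List Char)} {s : List Char}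
    (h : firstSplitA seps s = none) : ∀ x ∈ seps, ¬ 1 < (PySem.Chars.splitOn s x).length := by
  induction seps with
  | nil => simp
  | cons sep rest ih =>
      simp only [firstSplitA] at h
      split at h
      · exact absurd h (by simp)
      · intro x hx
        rcases List.mem_cons.1 hx with rfl | hx
        · assumption
        · exact ih h x hx

theorem firstSplitA_some {seps : List (List Char)} {s : List Char} {ps : List (List Char)}
    (h : firstSplitA seps s = some ps) :
    ∃ pre sep rest, seps = pre ++ sep :: rest ∧
      (∀ x ∈ pre, ¬ 1 < (PySem.Chars.splitOn s x).length) ∧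
      ps = PySem.Chars.splitOn s sep ∧ 1 < ps.length := by
  induction seps with
  | nil => simp [firstSplitA] at h
  | cons sep rest ih =>
      simp only [firstSplitA] at h
      split at h
      · cases h
        exact ⟨[], sep, rest, by simp, by simp, rfl, by assumption⟩
      · rcases ih h with ⟨pre, sp, rst, heq, hpre, hps, hlen⟩
        exact ⟨sep :: pre, sp, rst, by simp [heq], by
          intro x hx
          rcases List.mem_cons.1 hx with rfl | hx
          · assumption
          · exact hpre x hx, hps, hlen⟩

theorem canon_append_group (k t : String) (vs : List String) (l : List (String × String)) :
    canonB (vs.map (fun v => (v, k)) ++ l) t = if t ∈ vs then k else canonB l t := by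
  induction vs with
  | nil => simp
  | cons v vs' ih =>
    show (if t = v then k else canonB (vs'.map (fun v => (v, k)) ++ l) t) = _
    rw [ih]
    by_cases h : t = v <;> simp [h, List.mem_cons]

-- the common leaf: A's grouped-table scan equals B's flat first-match scan
theorem lookup_flatten (groups : List (String × List String)) (t : String) :
    lookupA groups t
      = [canonB (groups.flatMap (fun g => g.2.map (fun v => (v, g.1)))) t] := by
  induction groups with
  | nil => simp [lookupA, canonB]
  | cons g rest ih =>
    obtain ⟨k, vs⟩ := g
    rw [List.flatMap_cons]
    show (if t ∈ vs then [k] else lookupA rest t) = _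
    rw [canon_append_group]
    split_ifs with hmem
    · rfl
    · exact ih

theorem pairsB_eq : license_types_A.flatMap (fun g => g.2.map (fun v => (v, g.1))) = pairsB := by rfl

def finB (t : List Char) : String := canonB pairsB (PySem.Str.strip (String.ofList t))

theorem leaf_eq (s : List Char) :
    lookupA license_types_A (String.ofList (PySem.Chars.strip s)) = [finB s] := by
  rw [lookup_flatten, pairsB_eq]
  unfold finB
  rw [show PySem.Str.strip (String.ofList s) = String.ofList (PySem.Chars.strip s) by
    simp [PySem.Str.strip, String.toList_ofList]]

theorem sepsA_mem_ne {x : List Char} (hx : x ∈ separatorsA) : x ≠ ([] : List Char) :=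
  separatorsA_ne x hx

theorem main_eq_aux : ∀ (n : Nat) (s : List Char), s.length < n →
    cltA s = (splitAllL separatorsA s).map finB := by
  intro n
  induction n with
  | zero => intro s h; omega
  | succ n ih =>
    intro s hs
    rw [cltA]
    split
    next ps hfs =>
        obtain ⟨pre, sep, rest, heq, hpre, hps, hlen⟩ := firstSplitA_some hfs
        simp only [List.flatMap_subtype, List.unattach_attach]
        have hsep_mem : sep ∈ separatorsA := by rw [heq]; simp
        have hsep_ne : sep ≠ ([] : List Char) := sepsA_mem_ne hsep_mem
        have hpre_sub : ∀ x ∈ pre, x ∈ separatorsA := by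
          intro x hx; rw [heq]; simp [hx]
        have hocc_pre : ∀ x ∈ pre, ¬ x <:+: s := fun x hx =>
          not_infix_of_not_one_lt (sepsA_mem_ne (hpre_sub x hx)) (hpre x hx)

        have hsplit : splitAllL separatorsA s = ps.flatMap (splitAllL rest) := by
          rw [heq, splitAll_skip_all (fun x hx => sepsA_mem_ne (hpre_sub x hx)) hocc_pre (sep :: rest)]
          show (PySem.Chars.splitOn s sep).flatMap (splitAllL rest) = _
          rw [← hps]
        rw [hsplit]
        rw [List.map_flatMap]
        apply List.flatMap_congr
        intro p hp
        have hp' : p ∈ PySem.Chars.splitOn s sep := hps ▸ hp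
        have hlt : p.length < s.length := pv_piece_lt hsep_ne hp' (hps ▸ hlen)
        rw [ih p (by omega)]
        congr 1
        have hinf : p <:+: s := piece_infix hsep_ne hp'
        have hocc_p : ∀ x ∈ pre ++ [sep], ¬ x <:+: p := by
          intro x hx hxin
          rcases List.mem_append.1 hx with hx | hx
          · exact hocc_pre x hx (hxin.trans hinf)
          · simp at hx; subst hx
            exact piece_not_infix hsep_ne hp' hxin
        have := splitAll_skip_all (pre := pre ++ [sep])
          (fun x hx => by
            rcases List.mem_append.1 hx with hx | hx
            · exact sepsA_mem_ne (hpre_sub x hx)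
            · simp at hx; subst hx; exact hsep_ne)
          hocc_p rest
        rw [heq]
        rw [show pre ++ sep :: rest = (pre ++ [sep]) ++ rest by simp]
        exact this
    next hfs =>
        have hnone := firstSplitA_none hfs
        have hocc : ∀ x ∈ separatorsA, ¬ x <:+: s := fun x hx =>
          not_infix_of_not_one_lt (sepsA_mem_ne hx) (hnone x hx)
        have hall : splitAllL separatorsA s = [s] := by
          have := splitAll_skip_all (fun x hx => sepsA_mem_ne hx) hocc []
          simpa using this
        rw [hall]
        simpa using leaf_eq s

theorem main_eq : ∀ s : List Char, cltA s = (splitAllL separatorsA s).map finB :=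
  fun s => main_eq_aux (s.length + 1) s (by omega)

-- ===== VERDICT (by name: the statement is the Claim_ definition above) =====
theorem clean_license_type_py_spec : Claim_equal_clean_license_type_py := by
  intro s _
  unfold Spec_clean_license_type_py clean_license_type_py clean_license_type_py_alt
  rw [main_eq, foldB_eq]
  simp only [List.flatMap_cons, List.flatMap_nil, List.append_nil]
  rfl
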